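-- pv_equiv track=rewrite | github.com/memoryonrepeat/algo | foobar/google-foobar-2.py | solution
-- ===== SOURCE A (Python) =====
-- def solution(s):
--     i = 0
--     left_count = 0
--     count = 0
--     while i<len(s):
--     	if s[i] == '>':
--     		left_count += 1
--     	elif s[i] == '<':
--     		count += left_count
--
--     	i += 1
--
--     return count*2
-- ===== SOURCE B (Python) =====
-- def solution(s):
--     total = 0
--     for j, c in enumerate(s):
--         if c == '<':
--             total += s[:j].count('>')
--     return 2 * total
-- ===== Notes on version B (the rewrite author's own statement) =====
-- stated objective: alternative
-- what changed: Replaces A's single pass with a running '>' counter by a re-scanning strategy: for each '<' at index j, count '>' in the prefix s[:j] and sum, then double.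
import Mathlib
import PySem

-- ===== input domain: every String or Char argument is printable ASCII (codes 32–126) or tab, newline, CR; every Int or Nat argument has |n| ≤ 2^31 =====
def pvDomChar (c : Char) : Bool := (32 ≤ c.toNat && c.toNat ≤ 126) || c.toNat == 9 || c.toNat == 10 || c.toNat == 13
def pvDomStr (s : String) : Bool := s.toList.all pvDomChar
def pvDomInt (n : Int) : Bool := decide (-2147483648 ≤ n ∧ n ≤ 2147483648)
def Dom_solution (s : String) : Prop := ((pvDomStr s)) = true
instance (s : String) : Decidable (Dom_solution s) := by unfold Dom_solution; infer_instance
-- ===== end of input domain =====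

-- B replaces A's single pass with a running '>' counter by re-scanning the prefix before each '<' (alternative decomposition, not faster).

-- ===== PORT A =====
-- while i < len(s): look at s[i]; '>' bumps left_count, '<' adds left_count to count; return count*2
def solution (s : String) : Int :=
  let p := (PySem.List.pyRange 0 (s.toList.length) 1).foldl
    (fun (p : Int × Int) i =>
      let c := PySem.List.pyGetD s.toList i ' '   -- s[i], i always in range here
      if c = '>' then (p.1 + 1, p.2)
      else if c = '<' then (p.1, p.2 + p.1) else p) (0, 0)
  p.2 * 2

-- ===== PORT B =====
-- for j, c in enumerate(s): if c == '<': total += s[:j].count('>');  return 2*total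
-- (s[:j].count('>') counts a single character, exact as List.count on the slice)
def solution_alt (s : String) : Int :=
  2 * ((PySem.List.enumerate s.toList 0).foldl
    (fun acc (jc : Int × Char) =>
      if jc.2 = '<' then acc + ((PySem.List.slice s.toList none (some jc.1)).count '>' : Int)
      else acc) 0)

-- ===== PRECONDITION & SPEC =====
def Spec_solution (s : String) (out : Int) : Prop := out = solution_alt s
instance (s : String) (out : Int) : Decidable (Spec_solution s out) := by unfold Spec_solution; infer_instance

-- ===== CLAIM (what is proved, stated in full; the proofs are below) =====
def Claim_equal_solution : Prop := ∀ (s : String), Dom_solution s → Spec_solution s (solution s)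

-- ===== LEMMAS AND PROOFS =====

def pvStepA (p : Int × Int) (c : Char) : Int × Int :=
  if c = '>' then (p.1 + 1, p.2)
  else if c = '<' then (p.1, p.2 + p.1) else p

def pvSumB (l : List Char) : Int :=
  (PySem.List.enumerate l 0).foldl
    (fun acc (jc : Int × Char) =>
      if jc.2 = '<' then acc + ((PySem.List.slice l none (some jc.1)).count '>' : Int)
      else acc) 0

theorem pvFoldA_fst (l : List Char) (p : Int × Int) :
    (l.foldl pvStepA p).1 = p.1 + (l.count '>' : Int) := by
  induction l generalizing p with
  | nil => simp
  | cons c t ih =>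
    simp only [List.foldl_cons, List.count_cons, pvStepA]
    by_cases h1 : c = '>'
    · simp [h1, ih]; ring
    · by_cases h2 : c = '<' <;> simp [h1, h2, ih]

theorem pvSumB_append (l : List Char) (c : Char) :
    pvSumB (l ++ [c]) = pvSumB l + (if c = '<' then (l.count '>' : Int) else 0) := by
  unfold pvSumB
  rw [PySem.List.enumerate_append, List.foldl_append]
  simp only [PySem.List.enumerate_cons, PySem.List.enumerate_nil, List.foldl_cons, List.foldl_nil]
  have hslice : PySem.List.slice (l ++ [c]) none (some ((0 : Int) + l.length)) = l := by
    rw [zero_add]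
    rw [show ((l.length : Int)) = ((l.length : Nat) : Int) from rfl, PySem.List.slice_to_natCast]
    simp
  rw [hslice]
  have hcongr : ∀ (a : Int),
      (PySem.List.enumerate l 0).foldl
        (fun acc (jc : Int × Char) =>
          if jc.2 = '<' then acc + ((PySem.List.slice (l ++ [c]) none (some jc.1)).count '>' : Int)
          else acc) a
      = (PySem.List.enumerate l 0).foldl
        (fun acc (jc : Int × Char) =>
          if jc.2 = '<' then acc + ((PySem.List.slice l none (some jc.1)).count '>' : Int)
          else acc) a := by
    intro a
    apply PySem.List.foldl_congr_mem
    intro acc jc hmem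
    obtain ⟨k, hk, rfl⟩ := (PySem.List.mem_enumerate_iff l 0 jc).mp hmem
    have hks : PySem.List.slice (l ++ [c]) none (some ((0:Int) + k)) =
        PySem.List.slice l none (some ((0:Int) + k)) := by
      rw [zero_add, show ((k : Int)) = ((k : Nat) : Int) from rfl,
        PySem.List.slice_to_natCast, PySem.List.slice_to_natCast,
        List.take_append_of_le_length (le_of_lt hk)]
    rw [hks]
  rw [hcongr]
  split_ifs <;> simp

theorem pvMain (l : List Char) :
    (l.foldl pvStepA (0, 0)).2 = pvSumB l := by
  induction l using List.reverseRecOn with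
  | nil => simp [pvSumB, PySem.List.enumerate_nil]
  | append_singleton t c ih =>
    rw [List.foldl_append, pvSumB_append, ← ih]
    simp only [List.foldl_cons, List.foldl_nil, pvStepA]
    by_cases h1 : c = '>'
    · simp [h1]
    · by_cases h2 : c = '<' <;> simp [h1, h2, pvFoldA_fst]

-- ===== VERDICT (by name: the statement is the Claim_ definition above) =====
theorem solution_spec : Claim_equal_solution := by
  intro s _
  unfold Spec_solution solution solution_alt
  rw [show (s.toList.length : Int) = PySem.List.len s.toList from rfl]
  rw [PySem.List.foldl_pyRange_zero_pyGetD s.toList ' '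
    (fun (p : Int × Int) c =>
      if c = '>' then (p.1 + 1, p.2)
      else if c = '<' then (p.1, p.2 + p.1) else p) (0, 0)]
  have hfun : (fun (p : Int × Int) c =>
      if c = '>' then (p.1 + 1, p.2)
      else if c = '<' then (p.1, p.2 + p.1) else p) = pvStepA := rfl
  rw [hfun]
  show (List.foldl pvStepA (0, 0) s.toList).2 * 2 = _
  rw [pvMain s.toList]
  unfold pvSumB; ring
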